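-- pv_equiv track=rewrite | github.com/loadsoth/DSBrowser | derby_browser.py | chk_bldcount
-- ===== SOURCE A (Python) =====
-- def chk_bldcount(blist ):#blist が何種類の系統なのかを数えて返す
--     bloodlist = ('Ec','Fa','Hmp','Her','Him','ND','Nas','Nea','Mach',
--              'Sts','Swn','Pha','RC','Ted','Tom')
--     ret = 0
--     for i in bloodlist:
--         for j in blist:
--             if i == j:
--                 ret += 1
--                 break
--     return ret
-- ===== SOURCE B (Python) =====
-- def chk_bldcount(blist):
--     # Single pass with a bitmask: map each element to its bloodline index,
--     # set that bit, and return the popcount of the mask at the end.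
--     idx = {'Ec': 0, 'Fa': 1, 'Hmp': 2, 'Her': 3, 'Him': 4, 'ND': 5, 'Nas': 6,
--            'Nea': 7, 'Mach': 8, 'Sts': 9, 'Swn': 10, 'Pha': 11, 'RC': 12,
--            'Ted': 13, 'Tom': 14}
--     mask = 0
--     for j in blist:
--         i = idx.get(j)
--         if i is not None:
--             mask |= 1 << i
--     return mask.bit_count()
-- ===== Notes on version B (the rewrite author's own statement) =====
-- stated objective: faster
-- what changed: Inverts the loop structure: instead of A's outer loop over the 15 bloodlines each with an inner scan-and-break over blist, B makes a single pass over blist, maps each element to its bloodline index via a dict, accumulates a 15-bit presence bitmask, and returns its popcount.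
import Mathlib
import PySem

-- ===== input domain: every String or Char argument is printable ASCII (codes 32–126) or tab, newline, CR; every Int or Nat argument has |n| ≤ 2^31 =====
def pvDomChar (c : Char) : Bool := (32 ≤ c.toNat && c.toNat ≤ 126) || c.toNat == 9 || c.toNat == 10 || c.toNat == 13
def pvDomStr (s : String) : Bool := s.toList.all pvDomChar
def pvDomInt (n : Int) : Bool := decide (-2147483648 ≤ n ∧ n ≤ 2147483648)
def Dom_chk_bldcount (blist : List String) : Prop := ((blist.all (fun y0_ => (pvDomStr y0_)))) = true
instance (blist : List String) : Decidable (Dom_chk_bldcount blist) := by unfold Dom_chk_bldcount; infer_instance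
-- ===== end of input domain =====

-- B inverts the loop structure: a single pass over blist accumulating a presence bitmask
-- (index per bloodline via a dict), returning its popcount; measurably faster by a constant factor.

-- ===== PORT A =====
-- the tuple literal 'bloodlist' of A
def chkBloodlist : List String :=
  ["Ec","Fa","Hmp","Her","Him","ND","Nas","Nea","Mach","Sts","Swn","Pha","RC","Ted","Tom"]

-- A's inner 'for j in blist: if i == j: ret += 1; break'
def chkInner (i : String) (blist : List String) (ret : Int) : Int :=
  match blist with
  | [] => ret
  | j :: rest => if i == j then ret + 1 else chkInner i rest ret

def chk_bldcount (blist : List String) : Int :=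
  chkBloodlist.foldl (fun ret i => chkInner i blist ret) 0

-- ===== PORT B =====
-- B's dict literal 'idx' (bloodline → bit index; indices kept as Nat, the shift amounts)
def chkIdxDict : PySem.Dict String Nat :=
  PySem.Dict.mk [("Ec",0),("Fa",1),("Hmp",2),("Her",3),("Him",4),("ND",5),("Nas",6),
                 ("Nea",7),("Mach",8),("Sts",9),("Swn",10),("Pha",11),("RC",12),
                 ("Ted",13),("Tom",14)]

-- B's loop body: 'i = idx.get(j); if i is not None: mask |= 1 << i'
def chkStep (m : Nat) (j : String) : Nat :=
  match PySem.Dict.get? chkIdxDict j with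
  | some i => m ||| (1 <<< i)
  | none => m

def chk_bldcount_alt (blist : List String) : Int :=
  ((PySem.Int.bitCount ((blist.foldl chkStep 0 : Nat) : Int) : Nat) : Int)

-- ===== PRECONDITION & SPEC =====
def Spec_chk_bldcount (blist : List String) (out : Int) : Prop := out = chk_bldcount_alt blist
instance (blist : List String) (out : Int) : Decidable (Spec_chk_bldcount blist out) := by unfold Spec_chk_bldcount; infer_instance

-- ===== CLAIM (what is proved, stated in full; the proofs are below) =====
def Claim_equal_chk_bldcount : Prop := ∀ (blist : List String), Dom_chk_bldcount blist → Spec_chk_bldcount blist (chk_bldcount blist)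

-- ===== LEMMAS AND PROOFS =====

-- A's inner loop returns ret+1 iff i occurs in blist
theorem chkInner_eq (i : String) (blist : List String) (ret : Int) :
    chkInner i blist ret = if blist.contains i then ret + 1 else ret := by
  induction blist with
  | nil => simp [chkInner]
  | cons j rest ih =>
      by_cases h : i == j
      · have : i = j := eq_of_beq h
        subst this
        simp [chkInner]
      · have hji : (j == i) = false := by
          cases hji : j == i
          · rfl
          · exact absurd (BEq.symm hji) (by simpa using h)
        have hne : i ≠ j := fun e => h (by simp [e])
        simp [chkInner, h, ih, hne]

-- A's outer fold counts the bloodlines present in blist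
theorem foldl_count (bl : List String) (blist : List String) (c : Int) :
    bl.foldl (fun ret i => chkInner i blist ret) c
      = c + ((bl.filter (fun i => blist.contains i)).length : Int) := by
  induction bl generalizing c with
  | nil => simp
  | cons i rest ih =>
      rw [List.foldl_cons, chkInner_eq, List.filter_cons, ih]
      split_ifs with h <;> (simp; try ring)

-- the dict maps exactly the k-th bloodline to k, for k < 15
-- a successful dict lookup is a key-value pair of the literal
theorem get?_mem {v_ : Type} (l : List (String × v_)) (j : String) (v : v_)
    (h : (PySem.Dict.mk l).get? j = some v) : (j, v) ∈ l := by
  induction l with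
  | nil => simp [PySem.Dict.get?] at h
  | cons p rest ih =>
      obtain ⟨a, b⟩ := p
      rw [PySem.Dict.get?_mk_cons] at h
      by_cases hab : (a == j)
      · rw [if_pos hab] at h
        injection h with hv
        have : a = j := eq_of_beq hab
        subst this
        subst hv
        exact List.mem_cons_self
      · rw [if_neg hab] at h
        exact List.mem_cons_of_mem _ (ih h)

-- the dict maps exactly the k-th bloodline to k, for k < 15
theorem lookup_some (j : String) (k : Nat) :
    PySem.Dict.get? chkIdxDict j = some k ↔ (k < 15 ∧ chkBloodlist.getD k "" = j) := by
  constructor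
  · intro h
    have hm := get?_mem _ j k h
    simp only [List.mem_cons, List.not_mem_nil, or_false, Prod.mk.injEq] at hm
    rcases hm with ⟨rfl, rfl⟩|⟨rfl, rfl⟩|⟨rfl, rfl⟩|⟨rfl, rfl⟩|⟨rfl, rfl⟩|⟨rfl, rfl⟩|⟨rfl, rfl⟩|⟨rfl, rfl⟩|⟨rfl, rfl⟩|⟨rfl, rfl⟩|⟨rfl, rfl⟩|⟨rfl, rfl⟩|⟨rfl, rfl⟩|⟨rfl, rfl⟩|⟨rfl, rfl⟩ <;>
      exact ⟨by omega, rfl⟩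
  · rintro ⟨hk, hj⟩
    interval_cases k <;> (subst hj; decide)

-- B's fold sets exactly the bits of the bloodlines seen so far
theorem testBit_foldl (blist : List String) (m k : Nat) :
    (blist.foldl chkStep m).testBit k
      = (m.testBit k || blist.any (fun j => PySem.Dict.get? chkIdxDict j == some k)) := by
  induction blist generalizing m with
  | nil => simp
  | cons j rest ih =>
      rw [List.foldl_cons, ih, List.any_cons]
      unfold chkStep
      cases hj : PySem.Dict.get? chkIdxDict j with
      | none => simp
      | some i =>
          simp only [Nat.testBit_or, Nat.testBit_shiftLeft]
          by_cases hik : i = k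
          · subst hik; simp
          · have h1 : (some i == some k) = false := by simp [hik]
            have h2 : (decide (i ≤ k) && Nat.testBit 1 (k - i)) = false := by
              rcases Nat.lt_or_ge k i with h | h
              · simp [Nat.not_le.mpr h]
              · obtain ⟨d, hd⟩ : ∃ d, k - i = d + 1 := ⟨k - i - 1, by omega⟩
                rw [hd, Nat.testBit_add_one]
                simp
            rw [h1, h2]
            simp

-- the mask stays below 2^15
theorem foldl_lt (blist : List String) (m : Nat) (hm : m < 32768) :
    blist.foldl chkStep m < 32768 := by
  induction blist generalizing m with
  | nil => simpa
  | cons j rest ih =>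
      apply ih
      unfold chkStep
      cases hj : PySem.Dict.get? chkIdxDict j with
      | none => simpa
      | some i =>
          have hi : i < 15 := ((lookup_some j i).mp hj).1
          have h1 : (1 <<< i) < 32768 := by
            have : (1 : Nat) <<< i = 2 ^ i := Nat.one_shiftLeft i
            rw [this]
            calc 2 ^ i < 2 ^ 15 := Nat.pow_lt_pow_right (by omega) hi
              _ = 32768 := by norm_num
          exact Nat.or_lt_two_pow (n := 15) hm h1

-- popcount of a number below 2^b counts its set bits among 0..b-1
theorem bitCount_eq_filter (b : Nat) : ∀ (m : Nat), m < 2 ^ b →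
    PySem.Int.bitCount (m : Int) = ((List.range b).filter m.testBit).length := by
  induction b with
  | zero =>
      intro m hm
      interval_cases m
      simp [PySem.Int.bitCount_zero]
  | succ b ih =>
      intro m hm
      rcases Nat.eq_zero_or_pos m with h0 | h0
      · subst h0
        rw [show Nat.testBit 0 = (fun _ => false) from funext Nat.zero_testBit]
        simp [PySem.Int.bitCount_zero]
      · rw [PySem.Int.bitCount_natCast h0, ih (m / 2) (by omega),
            List.range_succ_eq_map, List.filter_cons, List.filter_map]
        have hcomp : (m.testBit ∘ Nat.succ) = (m / 2).testBit := by
          funext k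
          simp [Function.comp, Nat.testBit_add_one]
        rw [hcomp]
        simp only [Nat.testBit_zero]
        by_cases hb : m % 2 = 1
        · simp only [hb, decide_true, if_true, List.length_cons, List.length_map]
          omega
        · rw [if_neg (by simp [hb]), List.length_map]
          omega

-- the bloodline tuple is the table of its own first 15 entries
theorem bloodlist_eq_map :
    chkBloodlist = (List.range 15).map (fun k => chkBloodlist.getD k "") := by decide

-- ===== VERDICT (by name: the statement is the Claim_ definition above) =====
theorem chk_bldcount_spec : Claim_equal_chk_bldcount := by
  intro blist _
  show chk_bldcount blist = chk_bldcount_alt blist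
  have hA : chk_bldcount blist
      = ((chkBloodlist.filter (fun i => blist.contains i)).length : Int) := by
    simpa using foldl_count chkBloodlist blist 0
  have hmask : blist.foldl chkStep 0 < 2 ^ 15 := foldl_lt blist 0 (by norm_num)
  have hB : chk_bldcount_alt blist
      = (((List.range 15).filter (blist.foldl chkStep 0).testBit).length : Int) := by
    simp [chk_bldcount_alt, bitCount_eq_filter 15 _ hmask]
  rw [hA, hB]
  congr 1
  have e₁ : (List.range 15).filter (blist.foldl chkStep 0).testBit
      = (List.range 15).filter (fun k => blist.contains (chkBloodlist.getD k "")) := by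
    apply List.filter_congr
    intro k hk
    have hk15 : k < 15 := List.mem_range.mp hk
    rw [testBit_foldl, Nat.zero_testBit, Bool.false_or]
    cases hc : blist.contains (chkBloodlist.getD k "") with
    | false =>
        rw [List.any_eq_false]
        intro j hj hp
        have hjk := (lookup_some j k).mp (eq_of_beq hp)
        have hnm : chkBloodlist.getD k "" ∉ blist := by simpa using hc
        exact hnm (hjk.2 ▸ hj)
    | true =>
        rw [List.any_eq_true]
        exact ⟨chkBloodlist.getD k "", by simpa using hc,
          beq_iff_eq.mpr ((lookup_some _ k).mpr ⟨hk15, rfl⟩)⟩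
  rw [e₁]
  conv_lhs => rw [bloodlist_eq_map]
  rw [List.filter_map, List.length_map]
  rfl
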